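-- pv_equiv track=rewrite | github.com/quinnlqy/PokopiaDataSearch | scripts/scrape_pokopiaguide.py | parse_article_blocks
-- ===== SOURCE A (Python) =====
-- def parse_article_blocks(text: str) -> list[str]:
--     blocks = []
--     start = 0
--     while True:
--         idx = text.find("<article", start)
--         if idx == -1:
--             break
--         end = text.find("</article>", idx)
--         if end == -1:
--             break
--         blocks.append(text[idx:end + len("</article>")])
--         start = end + len("</article>")
--     return blocks
-- ===== SOURCE B (Python) =====
-- def parse_article_blocks(text: str) -> list[str]:
--     pieces = text.split("</article>")
--     return [p[p.find("<article"):] + "</article>"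
--             for p in pieces[:-1] if "<article" in p]
-- ===== Notes on version B (the rewrite author's own statement) =====
-- stated objective: idiomatic
-- what changed: Replaces the while/find cursor loop over the whole text by a single split on the closing article tag followed by a comprehension that keeps, for each piece before a close, the tail starting at its first opening article tag.
import Mathlib
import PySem

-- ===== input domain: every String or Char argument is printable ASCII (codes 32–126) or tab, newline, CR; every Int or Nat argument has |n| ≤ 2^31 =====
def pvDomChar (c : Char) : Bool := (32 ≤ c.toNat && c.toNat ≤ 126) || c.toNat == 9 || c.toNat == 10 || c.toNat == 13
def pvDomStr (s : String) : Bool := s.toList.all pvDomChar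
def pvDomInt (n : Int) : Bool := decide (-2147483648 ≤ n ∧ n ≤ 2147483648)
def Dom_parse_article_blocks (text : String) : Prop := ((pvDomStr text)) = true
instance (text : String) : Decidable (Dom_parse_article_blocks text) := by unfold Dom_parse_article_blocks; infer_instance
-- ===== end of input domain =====

-- B replaces A's while/find cursor loop with a split on the closing tag plus a comprehension (idiomatic; same result).

-- ===== PORT A =====
-- A's while-loop over state (start, blocks); the fuel argument only makes the recursion total
-- (each iteration that recurses advances start, so len+1 iterations always suffice; proved in pv_main).
def pvGoA (s : List Char) (fuel : Nat) (start : Int) (blocks : List (List Char)) : List (List Char) :=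
  match fuel with
  | 0 => blocks
  | fuel + 1 =>
    let idx := PySem.Chars.findFrom s "<article".toList start
    if idx = -1 then blocks
    else
      let e := PySem.Chars.findFrom s "</article>".toList idx
      if e = -1 then blocks
      else pvGoA s fuel (e + 10) (blocks ++ [PySem.Chars.slice s (some idx) (some (e + 10))])

def parse_article_blocks (text : String) : List String :=
  (pvGoA text.toList (text.toList.length + 1) 0 []).map String.ofList

-- ===== PORT B =====
-- B: split on the closing tag; keep pieces[:-1] that contain an open tag; emit the tail from its first open plus the close
def parse_article_blocks_alt (text : String) : List String :=
  let pieces := PySem.Chars.splitOn text.toList "</article>".toList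
  ((PySem.List.slice pieces none (some (-1))).filter
      (fun p => PySem.Chars.isIn "<article".toList p)).map
    (fun p => String.ofList
      (PySem.Chars.slice p (some (PySem.Chars.find p "<article".toList)) none ++ "</article>".toList))

-- ===== PRECONDITION & SPEC =====
def Spec_parse_article_blocks (text : String) (out : List String) : Prop := out = parse_article_blocks_alt text
instance (text : String) (out : List String) : Decidable (Spec_parse_article_blocks text out) := by unfold Spec_parse_article_blocks; infer_instance

-- ===== CLAIM (what is proved, stated in full; the proofs are below) =====
def Claim_equal_parse_article_blocks : Prop := ∀ (text : String), Dom_parse_article_blocks text → Spec_parse_article_blocks text (parse_article_blocks text)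

-- ===== LEMMAS AND PROOFS =====
def pvOpen : List Char := "<article".toList
def pvClose : List Char := "</article>".toList
def pvConsHead (p : List Char) : List (List Char) → List (List Char)
  | [] => [p]
  | x :: xs => (p ++ x) :: xs
def pvSplit : List Char → List (List Char)
  | [] => [[]]
  | c :: rest =>
    if pvClose.isPrefixOf (c :: rest) then [] :: pvSplit (rest.drop 9)
    else pvConsHead [c] (pvSplit rest)
termination_by l => l.length
decreasing_by all_goals (simp only [List.length_drop, List.length_cons]; omega)

theorem pvSplit_nil : pvSplit [] = [[]] := by rw [pvSplit]

theorem pvSplit_cons (c : Char) (rest : List Char) :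
    pvSplit (c :: rest) =
      if pvClose.isPrefixOf (c :: rest) then [] :: pvSplit (rest.drop 9)
      else pvConsHead [c] (pvSplit rest) := by rw [pvSplit]

theorem pvSplit_ne_nil (l : List Char) : pvSplit l ≠ [] := by
  cases l with
  | nil => simp [pvSplit_nil]
  | cons c rest =>
    rw [pvSplit_cons]
    split
    · simp
    · cases pvSplit rest <;> simp [pvConsHead]

theorem pvConsHead_consHead (p q : List Char) (x : List (List Char)) :
    pvConsHead p (pvConsHead q x) = pvConsHead (p ++ q) x := by
  cases x <;> simp [pvConsHead]

theorem pv_go_spec (fuel : Nat) : ∀ (l cur : List Char) (accl : List (List Char)),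
    l.length < fuel →
    PySem.Chars.splitOn.go pvClose fuel l cur accl =
      accl.reverse ++ pvConsHead cur.reverse (pvSplit l) := by
  induction fuel with
  | zero => intro l cur accl h; omega
  | succ fuel ih =>
    intro l cur accl h
    rw [PySem.Chars.splitOn.go.eq_def]
    cases l with
    | nil => simp [pvSplit_nil, pvConsHead]
    | cons c rest =>
      have hlen : pvClose.length = 10 := rfl
      simp only []
      split
      · rename_i hpre
        rw [hlen, show List.drop 10 (c :: rest) = rest.drop 9 from rfl]
        rw [ih _ _ _ (by simp only [List.length_drop, List.length_cons] at h ⊢; omega)]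
        rw [pvSplit_cons, if_pos hpre]
        obtain ⟨x, xs, hx⟩ : ∃ x xs, pvSplit (rest.drop 9) = x :: xs := by
          cases h' : pvSplit (rest.drop 9) with
          | nil => exact absurd h' (pvSplit_ne_nil _)
          | cons x xs => exact ⟨x, xs, rfl⟩
        simp [hx, pvConsHead]
      · rename_i hpre
        rw [ih _ _ _ (by simp only [List.length_cons] at h; omega)]
        rw [pvSplit_cons, if_neg hpre]
        rw [pvConsHead_consHead]
        simp

theorem pv_splitOn_eq (l : List Char) : PySem.Chars.splitOn l pvClose = pvSplit l := by
  unfold PySem.Chars.splitOn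
  rw [pv_go_spec (l.length + 1) l [] [] (by omega)]
  obtain ⟨x, xs, hx⟩ : ∃ x xs, pvSplit l = x :: xs := by
    cases h' : pvSplit l with
    | nil => exact absurd h' (pvSplit_ne_nil _)
    | cons x xs => exact ⟨x, xs, rfl⟩
  simp [hx, pvConsHead]

theorem pvSplit_no_sep (l : List Char) (h : ¬ pvClose <:+: l) : pvSplit l = [l] := by
  induction l with
  | nil => exact pvSplit_nil
  | cons c rest ih =>
    rw [pvSplit_cons, if_neg (by
      intro hpre
      exact h ((List.prefix_iff_eq_take.mp (by simpa using hpre)).symm ▸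
        (List.take_prefix _ _).isInfix))]
    rw [ih (fun hi => h (hi.trans (List.suffix_cons c rest).isInfix))]
    rfl

theorem pvSplit_first : ∀ (p : Nat) (l : List Char), pvClose <+: l.drop p →
    (∀ i < p, ¬ pvClose <+: l.drop i) →
    pvSplit l = l.take p :: pvSplit (l.drop (p + 10)) := by
  intro p
  induction p with
  | zero =>
    intro l h1 _
    simp only [List.drop_zero] at h1
    obtain ⟨c, rest, rfl⟩ : ∃ c rest, l = c :: rest := by
      cases l with
      | nil => simp [pvClose] at h1
      | cons c rest => exact ⟨c, rest, rfl⟩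
    rw [pvSplit_cons, if_pos (List.isPrefixOf_iff_prefix.mpr h1)]
    simp
  | succ p ih =>
    intro l h1 h2
    obtain ⟨c, rest, rfl⟩ : ∃ c rest, l = c :: rest := by
      cases l with
      | nil =>
        rw [List.drop_nil] at h1
        simp [pvClose] at h1
      | cons c rest => exact ⟨c, rest, rfl⟩
    rw [pvSplit_cons, if_neg (fun hpre => h2 0 (by omega)
      (by simpa using List.isPrefixOf_iff_prefix.mp hpre))]
    rw [ih rest (by simpa using h1) (fun i hi => by
      have := h2 (i+1) (by omega)
      simpa using this)]
    simp [pvConsHead]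

theorem pv_find_eq_of_first (u sub : List Char) (d : Nat) (h1 : sub <+: u.drop d)
    (h2 : ∀ i < d, ¬ sub <+: u.drop i) : PySem.Chars.find u sub = (d : Int) := by
  have hinf : sub <:+: u := h1.isInfix.trans (List.drop_suffix d u).isInfix
  have hne : PySem.Chars.find u sub ≠ -1 := (PySem.Chars.find_ne_neg_one_iff u sub).mpr hinf
  have h0 : 0 ≤ PySem.Chars.find u sub := by
    have := PySem.Chars.neg_one_le_find u sub; omega
  obtain ⟨ha, hb⟩ := PySem.Chars.find_spec h0
  have : (PySem.Chars.find u sub).toNat = d := by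
    rcases lt_trichotomy (PySem.Chars.find u sub).toNat d with hlt | he | hgt
    · exact absurd ha (h2 _ hlt)
    · exact he
    · exact absurd h1 (hb d hgt)
  omega

theorem pv_findFrom_eq_of_first (s sub : List Char) (k m : Nat) (hk : k ≤ s.length)
    (hkm : k ≤ m) (h1 : sub <+: s.drop m) (h2 : ∀ i, k ≤ i → i < m → ¬ sub <+: s.drop i) :
    PySem.Chars.findFrom s sub (k : Int) = (m : Int) := by
  rw [PySem.Chars.findFrom_natCast s sub k hk]
  have hfd : PySem.Chars.find (s.drop k) sub = ((m - k : Nat) : Int) := by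
    apply pv_find_eq_of_first
    · rw [List.drop_drop, show k + (m - k) = m by omega]; exact h1
    · intro i hi
      rw [List.drop_drop]
      rw [show k + i = i + k by omega]
      exact h2 (i + k) (by omega) (by omega)
  rw [hfd]
  rw [if_neg (by omega)]
  omega

def pvBv (t : List Char) : List (List Char) :=
  ((PySem.Chars.splitOn t pvClose).dropLast.filter (fun p => PySem.Chars.isIn pvOpen p)).map
    (fun p => PySem.Chars.slice p (some (PySem.Chars.find p pvOpen)) none ++ pvClose)

-- occurrences inside a take are occurrences, early
theorem pv_open_in_take {t : List Char} {p : Nat} (h : PySem.Chars.isIn pvOpen (t.take p) = true) :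
    ∃ i, pvOpen <+: t.drop i ∧ i + 8 ≤ p := by
  obtain ⟨j, hj⟩ := (PySem.Chars.exists_prefix_drop_iff_isIn pvOpen (t.take p)).mpr h
  refine ⟨j, (hj.trans ?_), ?_⟩
  · rw [List.drop_take]; exact List.take_prefix _ _
  · have := hj.length_le
    simp only [List.length_drop, List.length_take, pvOpen] at this ⊢
    simp at this
    omega

theorem pvBv_cons (t : List Char) (p : Nat) (h1 : pvClose <+: t.drop p)
    (h2 : ∀ i < p, ¬ pvClose <+: t.drop i) :
    pvBv t = (if PySem.Chars.isIn pvOpen (t.take p) then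
        [PySem.Chars.slice (t.take p) (some (PySem.Chars.find (t.take p) pvOpen)) none ++ pvClose]
      else []) ++ pvBv (t.drop (p + 10)) := by
  unfold pvBv
  rw [pv_splitOn_eq, pvSplit_first p t h1 h2, ← pv_splitOn_eq]
  rw [List.dropLast_cons_of_ne_nil (by rw [pv_splitOn_eq]; exact pvSplit_ne_nil _)]
  rw [List.filter_cons]
  split
  · simp
  · simp

theorem pvBv_no_sep (t : List Char) (h : ¬ pvClose <:+: t) : pvBv t = [] := by
  unfold pvBv
  rw [pv_splitOn_eq, pvSplit_no_sep t h]
  simp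

theorem pv_char_at {u t : List Char} {j i : Nat} (h : u <+: t.drop j) (hi : i < u.length) :
    t[j + i]? = u[i]? := by
  have h2 : i < (t.drop j).length := lt_of_lt_of_le hi h.length_le
  rw [← List.getElem?_drop, List.getElem?_eq_getElem h2, List.getElem?_eq_getElem hi,
    h.getElem hi]
  rfl

theorem pv_char_sep {t : List Char} {p j : Nat}
    (hC : pvClose <+: t.drop p) (hO : pvOpen <+: t.drop j) :
    j + 8 ≤ p ∨ p + 10 ≤ j := by
  by_contra hcon
  push Not at hcon
  obtain ⟨h1, h2⟩ := hcon
  rcases lt_trichotomy j p with hjp | rfl | hpj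
  · have e1 := pv_char_at hO (i := p - j) (by show p - j < 8; omega)
    have e2 := pv_char_at hC (i := 0) (by show 0 < 10; omega)
    rw [show j + (p - j) = p by omega] at e1
    rw [Nat.add_zero] at e2
    rw [e2] at e1
    have : ∀ d, 1 ≤ d → d ≤ 7 → pvClose[0]? ≠ pvOpen[d]? := by decide
    exact this (p - j) (by omega) (by omega) e1
  · have e1 := pv_char_at hO (i := 1) (by show 1 < 8; omega)
    have e2 := pv_char_at hC (i := 1) (by show 1 < 10; omega)
    rw [e2] at e1
    exact absurd e1 (by decide)
  · have e1 := pv_char_at hO (i := 0) (by show 0 < 8; omega)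
    have e2 := pv_char_at hC (i := j - p) (by show j - p < 10; omega)
    rw [Nat.add_zero] at e1
    rw [show p + (j - p) = j by omega] at e2
    rw [e2] at e1
    have : ∀ d, 1 ≤ d → d ≤ 9 → pvClose[d]? ≠ pvOpen[0]? := by decide
    exact this (j - p) (by omega) (by omega) e1

theorem pvBv_nil (t : List Char)
    (hnb : ∀ i c, pvOpen <+: t.drop i → pvClose <+: t.drop c → i + 8 ≤ c → False) :
    pvBv t = [] := by
  by_cases hc : pvClose <:+: t
  · have h0 : 0 ≤ PySem.Chars.find t pvClose := by
      have := PySem.Chars.neg_one_le_find t pvClose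
      have := (PySem.Chars.find_ne_neg_one_iff t pvClose).mpr hc
      omega
    obtain ⟨ha, hb⟩ := PySem.Chars.find_spec h0
    set p := (PySem.Chars.find t pvClose).toNat with hp
    rw [pvBv_cons t p ha hb]
    rw [if_neg (by
      intro hin
      obtain ⟨i, hpre, hle⟩ := pv_open_in_take hin
      exact hnb i p hpre ha hle)]
    rw [pvBv_nil (t.drop (p + 10)) (by
      intro i c hoi hcc hic
      rw [List.drop_drop] at hoi hcc
      exact hnb (p + 10 + i) (p + 10 + c) hoi hcc (by omega))]
    simp
  · exact pvBv_no_sep t hc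
termination_by t.length
decreasing_by
  have hl := ha.length_le
  simp only [List.length_drop, pvClose] at hl ⊢
  have hne : t ≠ [] := by
    intro he
    subst he
    simp [pvClose] at hc
  have : 0 < t.length := List.length_pos_of_ne_nil hne
  simp at hl
  omega

theorem pvGoA_succ (s : List Char) (f : Nat) (start : Int) (blocks : List (List Char)) :
    pvGoA s (f + 1) start blocks =
      (if PySem.Chars.findFrom s pvOpen start = -1 then blocks
       else if PySem.Chars.findFrom s pvClose (PySem.Chars.findFrom s pvOpen start) = -1 then blocks
       else pvGoA s f (PySem.Chars.findFrom s pvClose (PySem.Chars.findFrom s pvOpen start) + 10)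
         (blocks ++ [PySem.Chars.slice s (some (PySem.Chars.findFrom s pvOpen start))
           (some (PySem.Chars.findFrom s pvClose (PySem.Chars.findFrom s pvOpen start) + 10))])) := rfl

theorem pv_main (s : List Char) : ∀ (n k fuel : Nat) (blocks : List (List Char)),
    s.length - k = n → k ≤ s.length → s.length - k < fuel →
    pvGoA s fuel (k : Int) blocks = blocks ++ pvBv (List.drop k s) := by
  intro n
  induction n using Nat.strong_induction_on with
  | _ n IH =>
  intro k fuel blocks hn hk hf
  obtain ⟨f, rfl⟩ : ∃ f, fuel = f + 1 := ⟨fuel - 1, by omega⟩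
  rw [pvGoA_succ]
  by_cases hop : pvOpen <:+: List.drop k s
  · -- there is an open tag at or after k
    have h0 : 0 ≤ PySem.Chars.find (List.drop k s) pvOpen := by
      have := PySem.Chars.neg_one_le_find (List.drop k s) pvOpen
      have := (PySem.Chars.find_ne_neg_one_iff (List.drop k s) pvOpen).mpr hop
      omega
    obtain ⟨ha0, hb⟩ := PySem.Chars.find_spec h0
    set j := (PySem.Chars.find (List.drop k s) pvOpen).toNat with hj
    have ha := ha0
    rw [List.drop_drop] at ha
    have hjlen : k + j + 8 ≤ s.length := by
      have := ha.length_le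
      simp only [List.length_drop] at this
      have : pvOpen.length = 8 := rfl
      omega
    have idxEq : PySem.Chars.findFrom s pvOpen (k : Int) = ((k + j : Nat) : Int) := by
      apply pv_findFrom_eq_of_first s pvOpen k (k + j) hk (by omega) ha
      intro i hki hij
      rw [show i = k + (i - k) by omega, ← List.drop_drop]
      exact hb (i - k) (by omega)
    rw [idxEq]
    rw [if_neg (by omega)]
    by_cases hc : pvClose <:+: List.drop k s
    · -- there is a close tag at or after k
      have h0c : 0 ≤ PySem.Chars.find (List.drop k s) pvClose := by
        have := PySem.Chars.neg_one_le_find (List.drop k s) pvClose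
        have := (PySem.Chars.find_ne_neg_one_iff (List.drop k s) pvClose).mpr hc
        omega
      obtain ⟨hca, hcb⟩ := PySem.Chars.find_spec h0c
      set p := (PySem.Chars.find (List.drop k s) pvClose).toNat with hp
      have hca' := hca
      rw [List.drop_drop] at hca'
      have hplen : k + p + 10 ≤ s.length := by
        have := hca'.length_le
        simp only [List.length_drop] at this
        have : pvClose.length = 10 := rfl
        omega
      rcases pv_char_sep hca ha0 with h8 | h10
      · -- the open tag precedes the first close: A emits a block
        have eEq : PySem.Chars.findFrom s pvClose ((k + j : Nat) : Int) = ((k + p : Nat) : Int) := by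
          apply pv_findFrom_eq_of_first s pvClose (k + j) (k + p) (by omega) (by omega) hca'
          intro i hki hip
          rw [show i = k + (i - k) by omega, ← List.drop_drop]
          exact hcb (i - k) (by omega)
        rw [eEq]
        rw [if_neg (by omega)]
        have hcast : ((k + p : Nat) : Int) + 10 = ((k + p + 10 : Nat) : Int) := by push_cast; ring
        rw [hcast]
        rw [IH (s.length - (k + p + 10)) (by omega) (k + p + 10) f _ rfl (by omega) (by omega)]
        -- the block A slices out of s
        have hblk : PySem.Chars.slice s (some ((k + j : Nat) : Int)) (some ((k + p + 10 : Nat) : Int))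
            = List.take (p - j) (List.drop j (List.drop k s)) ++ pvClose := by
          rw [PySem.Chars.slice_eq_listSlice]
          rw [PySem.List.slice_toNat s (by omega) (by omega)]
          rw [Int.toNat_natCast, Int.toNat_natCast]
          rw [List.drop_drop]
          rw [show k + p + 10 - (k + j) = (p - j) + 10 by omega]
          rw [List.take_add]
          congr 1
          rw [List.drop_drop]
          rw [show k + j + (p - j) = k + p by omega]
          rw [show (10:Nat) = pvClose.length from rfl]
          exact (List.prefix_iff_eq_take.mp hca').symm
        rw [hblk]
        -- B's decomposition at the first close
        rw [pvBv_cons (List.drop k s) p hca hcb]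
        have hopin : PySem.Chars.isIn pvOpen (List.take p (List.drop k s)) = true := by
          rw [← PySem.Chars.exists_prefix_drop_iff_isIn]
          refine ⟨j, ?_⟩
          rw [List.drop_take]
          rw [List.prefix_take_iff]
          refine ⟨by rw [List.drop_drop]; exact ha, ?_⟩
          have : pvOpen.length = 8 := rfl
          omega
        rw [if_pos hopin]
        have hfind : PySem.Chars.find (List.take p (List.drop k s)) pvOpen = (j : Int) := by
          apply pv_find_eq_of_first
          · rw [List.drop_take, List.prefix_take_iff]
            refine ⟨by rw [List.drop_drop]; exact ha, ?_⟩
            have : pvOpen.length = 8 := rfl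
            omega
          · intro i hij hpre
            rw [List.drop_take] at hpre
            exact hb i (by omega) (hpre.trans (List.take_prefix _ _))
        rw [hfind]
        have hslice : PySem.Chars.slice (List.take p (List.drop k s)) (some (j : Int)) none
            = List.take (p - j) (List.drop j (List.drop k s)) := by
          rw [PySem.Chars.slice_eq_listSlice]
          rw [PySem.List.slice_from _ (by omega)]
          rw [Int.toNat_natCast, List.drop_take]
        rw [hslice]
        simp only [List.drop_drop, List.append_assoc, Nat.add_assoc]
      · -- first close precedes the open: A's first iteration skips past it
        have idx2 : PySem.Chars.findFrom s pvOpen ((k + p + 10 : Nat) : Int) = ((k + j : Nat) : Int) := by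
          apply pv_findFrom_eq_of_first s pvOpen (k + p + 10) (k + j) (by omega) (by omega) ha
          intro i hki hij
          rw [show i = k + (i - k) by omega, ← List.drop_drop]
          exact hb (i - k) (by omega)
        have hstep : pvGoA s (f + 1) ((k + p + 10 : Nat) : Int) blocks =
            (if ((k + j : Nat) : Int) = -1 then blocks
             else if PySem.Chars.findFrom s pvClose ((k + j : Nat) : Int) = -1 then blocks
             else pvGoA s f (PySem.Chars.findFrom s pvClose ((k + j : Nat) : Int) + 10)
               (blocks ++ [PySem.Chars.slice s (some ((k + j : Nat) : Int))
                 (some (PySem.Chars.findFrom s pvClose ((k + j : Nat) : Int) + 10))])) := by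
          rw [pvGoA_succ, idx2]
        rw [if_neg (by omega : ¬ ((k + j : Nat) : Int) = -1)] at hstep
        rw [← hstep]
        rw [IH (s.length - (k + p + 10)) (by omega) (k + p + 10) (f + 1) blocks rfl (by omega) (by omega)]
        rw [pvBv_cons (List.drop k s) p hca hcb]
        rw [if_neg (by
          intro hin
          obtain ⟨i, hpre, hle⟩ := pv_open_in_take hin
          exact hb i (by omega) hpre)]
        simp only [List.drop_drop, Nat.add_assoc, List.nil_append]
    · -- open but no close at or after k: A stops at the failed close-find
      rw [if_pos (by
        apply (PySem.Chars.findFrom_natCast_eq_neg_one_iff s pvClose (k + j) (by omega)).mpr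
        intro hinf
        rw [show List.drop (k + j) s = List.drop j (List.drop k s) by rw [List.drop_drop]] at hinf
        exact hc (hinf.trans (List.drop_suffix _ _).isInfix))]
      rw [pvBv_nil (List.drop k s) (by
        intro i c _ hcc _
        exact hc (hcc.isInfix.trans (List.drop_suffix _ _).isInfix))]
      simp
  · -- no open tag at or after k: A stops, B has no qualifying piece
    rw [if_pos ((PySem.Chars.findFrom_natCast_eq_neg_one_iff s pvOpen k hk).mpr hop)]
    rw [pvBv_nil (List.drop k s) (by
      intro i c hoi _ _
      exact hop (hoi.isInfix.trans (List.drop_suffix _ _).isInfix))]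
    simp
  -- remaining: close-after-open absent case

-- ===== VERDICT (by name: the statement is the Claim_ definition above) =====
theorem parse_article_blocks_spec : Claim_equal_parse_article_blocks := by
  intro text _
  unfold Spec_parse_article_blocks parse_article_blocks parse_article_blocks_alt
  simp only [PySem.List.slice_to_neg_one]
  have hmain := pv_main text.toList (text.toList.length) 0 (text.toList.length + 1) []
    rfl (by omega) (by omega)
  simp only [Nat.cast_zero] at hmain
  rw [hmain]
  rw [List.drop_zero, List.nil_append]
  unfold pvBv
  rw [List.map_map]
  rfl
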